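-- pv_equiv track=rewrite | github.com/Benjamin-VRB/IN200-Sudoku | Grille/Sudoku_Irregulier.py | initialiser_contraintes
-- ===== SOURCE A (Python) =====
-- def initialiser_contraintes(grille, plan_cage, dimension=9):
--     """Pour preparer les set contenant les informations des lignes/colonnes/cages"""
--
--     lignes_utilisees = [set() for _ in range(dimension)]
--     cols_utilisees = [set() for _ in range(dimension)]
--
--     cages_utilisees = {}
--
--     for l in range(dimension):
--         for c in range(dimension):
--             val = grille[l][c]
--             num_cage = plan_cage[l][c]
--
--             # Initialisation du set pour la cage si pas encore fait
--             if num_cage not in cages_utilisees: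
--                 cages_utilisees[num_cage] = set()
--
--             if val != 0:
--                 lignes_utilisees[l].add(val)
--                 cols_utilisees[c].add(val)
--                 cages_utilisees[num_cage].add(val)
--
--     return lignes_utilisees, cols_utilisees, cages_utilisees
-- ===== SOURCE B (Python) =====
-- def initialiser_contraintes(grille, plan_cage, dimension=9):
--     """Trois parcours independants: lignes par comprehension, colonnes via zip(*),
--     cages en deux phases (cles d'abord, valeurs ensuite)."""
--     rows = [[grille[l][c] for c in range(dimension)] for l in range(dimension)]
--     cage_rows = [[plan_cage[l][c] for c in range(dimension)] for l in range(dimension)]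
--
--     lignes_utilisees = [{v for v in row if v != 0} for row in rows]
--     cols_utilisees = [{v for v in col if v != 0} for col in zip(*rows)]
--
--     cages_utilisees = {num: set() for crow in cage_rows for num in crow}
--     for grow, crow in zip(rows, cage_rows):
--         for v, num in zip(grow, crow):
--             if v != 0:
--                 cages_utilisees[num].add(v)
--
--     return lignes_utilisees, cols_utilisees, cages_utilisees
-- ===== Notes on version B (the rewrite author's own statement) =====
-- stated objective: alternative
-- what changed: Replaces A's single nested index loop that threads three accumulators at once by three independent traversals: rows as per-row set comprehensions, columns by transposing with zip(*), and cages in two phases (a dict comprehension creating a key for every cage id, then one pass adding nonzero values), with no index writes into pre-built lists.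
import Mathlib
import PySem

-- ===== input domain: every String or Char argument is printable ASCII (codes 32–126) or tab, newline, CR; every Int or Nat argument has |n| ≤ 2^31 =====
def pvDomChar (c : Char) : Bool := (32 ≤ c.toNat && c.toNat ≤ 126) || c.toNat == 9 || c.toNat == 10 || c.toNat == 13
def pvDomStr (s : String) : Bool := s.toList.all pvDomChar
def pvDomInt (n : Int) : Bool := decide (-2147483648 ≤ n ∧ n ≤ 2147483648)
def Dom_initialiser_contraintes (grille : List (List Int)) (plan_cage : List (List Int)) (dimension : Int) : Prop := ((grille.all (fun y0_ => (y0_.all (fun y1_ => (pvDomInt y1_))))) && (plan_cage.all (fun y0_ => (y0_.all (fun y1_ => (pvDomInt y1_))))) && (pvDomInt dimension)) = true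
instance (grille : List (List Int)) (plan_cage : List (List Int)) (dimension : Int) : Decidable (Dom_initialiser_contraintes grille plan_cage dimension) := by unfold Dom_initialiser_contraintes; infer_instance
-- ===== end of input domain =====

-- B replaces A's single nested index loop threading three accumulators by three independent
-- traversals (per-row comprehensions, zip(*)-transpose for columns, two-phase cage dict);
-- objective: alternative decomposition, same asymptotic cost.

-- ===== PORT A =====
-- grille[l][c] / plan_cage[l][c] may raise IndexError in Python; ported via pyGetD —
-- Pre_initialiser_contraintes excludes exactly the raising inputs, so the defaults are unreachable.
def initialiser_contraintes (grille : List (List Int)) (plan_cage : List (List Int)) (dimension : Int) : List (List Int) × List (List Int) × (List (Int × List Int)) :=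
  let lignes0 : List (List Int) := (PySem.List.pyRange 0 dimension 1).map (fun _ => ([] : List Int))
  let cols0 : List (List Int) := (PySem.List.pyRange 0 dimension 1).map (fun _ => ([] : List Int))
  let st :=
    (PySem.List.pyRange 0 dimension 1).foldl (fun st l =>
      (PySem.List.pyRange 0 dimension 1).foldl (fun st c =>
        let val := PySem.List.pyGetD (PySem.List.pyGetD grille l []) c 0
        let num := PySem.List.pyGetD (PySem.List.pyGetD plan_cage l []) c 0
        let cages := if ¬ st.2.2.contains num then st.2.2.insert num [] else st.2.2
        if val ≠ 0 then
          (PySem.List.pySetD st.1 l (PySem.Set.add (PySem.List.pyGetD st.1 l []) val),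
           PySem.List.pySetD st.2.1 c (PySem.Set.add (PySem.List.pyGetD st.2.1 c []) val),
           cages.modify num [] (fun s => PySem.Set.add s val))
        else (st.1, st.2.1, cages)) st)
      (lignes0, cols0, (PySem.Dict.empty : PySem.Dict Int (List Int)))
  (st.1, st.2.1, st.2.2.items)

-- ===== PORT B =====
-- zip(*rows): length = min of the row lengths; column c collects row[c] of every row.
def pvZipStar (rows : List (List Int)) : List (List Int) :=
  match rows with
  | [] => []
  | r :: rs =>
      (List.range (rs.foldl (fun m t => min m t.length) r.length)).map
        (fun c => (r :: rs).map (fun t => t.getD c 0))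

-- grille[l][c] / plan_cage[l][c] in the comprehensions may raise IndexError, as in A;
-- ported via pyGetD, whose defaults are unreachable under Pre_initialiser_contraintes.
-- cages_utilisees[num].add(v): num is always a key (phase 1 inserted every cage id),
-- so Dict.modify (which would insert a missing key) is exact here.
def initialiser_contraintes_alt (grille : List (List Int)) (plan_cage : List (List Int)) (dimension : Int) : List (List Int) × List (List Int) × (List (Int × List Int)) :=
  let rows := (PySem.List.pyRange 0 dimension 1).map (fun l =>
    (PySem.List.pyRange 0 dimension 1).map (fun c =>
      PySem.List.pyGetD (PySem.List.pyGetD grille l []) c 0))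
  let cage_rows := (PySem.List.pyRange 0 dimension 1).map (fun l =>
    (PySem.List.pyRange 0 dimension 1).map (fun c =>
      PySem.List.pyGetD (PySem.List.pyGetD plan_cage l []) c 0))
  let lignes := rows.map (fun row => PySem.Set.ofList (row.filter (fun v => v != 0)))
  let cols := (pvZipStar rows).map (fun col => PySem.Set.ofList (col.filter (fun v => v != 0)))
  let cages0 : PySem.Dict Int (List Int) :=
    (cage_rows.flatMap (fun crow => crow)).foldl (fun d num => d.insert num []) PySem.Dict.empty
  let cages :=
    (List.zip rows cage_rows).foldl (fun d pr =>
      (List.zip pr.1 pr.2).foldl (fun d q =>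
        if q.1 ≠ 0 then d.modify q.2 [] (fun s => PySem.Set.add s q.1) else d) d) cages0
  (lignes, cols, cages.items)

-- ===== PRECONDITION & SPEC =====
-- Pre_ excludes exactly the inputs where A raises IndexError: 0 < dimension but grille or
-- plan_cage lacks dimension rows of at least dimension entries each.
def Pre_initialiser_contraintes (grille : List (List Int)) (plan_cage : List (List Int)) (dimension : Int) : Prop :=
  dimension ≤ 0 ∨
    (dimension.toNat ≤ grille.length ∧ dimension.toNat ≤ plan_cage.length ∧
     (∀ r ∈ grille.take dimension.toNat, dimension.toNat ≤ r.length) ∧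
     (∀ r ∈ plan_cage.take dimension.toNat, dimension.toNat ≤ r.length))
instance (grille : List (List Int)) (plan_cage : List (List Int)) (dimension : Int) : Decidable (Pre_initialiser_contraintes grille plan_cage dimension) := by unfold Pre_initialiser_contraintes; infer_instance

def pvWitness_initialiser_contraintes : List (List Int) × List (List Int) × Int :=
  ([[1, 0, 2, 0], [0, 2, 1, 1], [3, 0, 0, 2], [1, 2, 0, 0]],
   [[1, 1, 2, 2], [1, 3, 3, 2], [4, 4, 3, 5], [4, 5, 5, 5]], 2)

def Spec_initialiser_contraintes (grille : List (List Int)) (plan_cage : List (List Int)) (dimension : Int) (out : List (List Int) × List (List Int) × (List (Int × List Int))) : Prop := out = initialiser_contraintes_alt grille plan_cage dimension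
instance (grille : List (List Int)) (plan_cage : List (List Int)) (dimension : Int) (out : List (List Int) × List (List Int) × (List (Int × List Int))) : Decidable (Spec_initialiser_contraintes grille plan_cage dimension out) := by unfold Spec_initialiser_contraintes; infer_instance

-- ===== CLAIM (what is proved, stated in full; the proofs are below) =====
def Claim_equal_initialiser_contraintes : Prop := ∀ (grille : List (List Int)) (plan_cage : List (List Int)) (dimension : Int), Dom_initialiser_contraintes grille plan_cage dimension → Pre_initialiser_contraintes grille plan_cage dimension → Spec_initialiser_contraintes grille plan_cage dimension (initialiser_contraintes grille plan_cage dimension)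


-- ===== LEMMAS AND PROOFS =====

-- cell value helpers
def pvG (m : List (List Int)) (l c : Int) : Int :=
  PySem.List.pyGetD (PySem.List.pyGetD m l []) c 0

def pvCondAdd (s : List Int) (v : Int) : List Int :=
  if v ≠ 0 then PySem.Set.add s v else s

def pvStepA (d : PySem.Dict Int (List Int)) (q : Int × Int) : PySem.Dict Int (List Int) :=
  let d1 := if ¬ d.contains q.1 then d.insert q.1 [] else d
  if q.2 ≠ 0 then d1.modify q.1 [] (fun s => PySem.Set.add s q.2) else d1

def pvStepM (d : PySem.Dict Int (List Int)) (q : Int × Int) : PySem.Dict Int (List Int) :=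
  if q.2 ≠ 0 then d.modify q.1 [] (fun s => PySem.Set.add s q.2) else d

def pvP1 (ns : List Int) : PySem.Dict Int (List Int) :=
  ns.foldl (fun d n => d.insert n []) PySem.Dict.empty

def pvBL (grille : List (List Int)) (l : Int) (L : List (List Int)) (c : Int) : List (List Int) :=
  if pvG grille l c ≠ 0 then
    PySem.List.pySetD L l (PySem.Set.add (PySem.List.pyGetD L l []) (pvG grille l c))
  else L

def pvBC (grille : List (List Int)) (l : Int) (C : List (List Int)) (c : Int) : List (List Int) :=
  if pvG grille l c ≠ 0 then
    PySem.List.pySetD C c (PySem.Set.add (PySem.List.pyGetD C c []) (pvG grille l c))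
  else C

def pvBD (grille plan_cage : List (List Int)) (l : Int) (D : PySem.Dict Int (List Int)) (c : Int) : PySem.Dict Int (List Int) :=
  pvStepA D (pvG plan_cage l c, pvG grille l c)

def pvTrim (m : List (List Int)) (N : Nat) : List (List Int) :=
  (m.take N).map (fun r => r.take N)

-- index primitives
theorem pvIdx_in (n : Nat) (i : Int) (h0 : 0 ≤ i) (h : i < (n : Int)) :
    PySem.List.pyIdx? n i = some i.toNat := by
  simp [PySem.List.pyIdx?, h0, h]

theorem pvIdx_out (n : Nat) (i : Int) (h : (n : Int) ≤ i) :
    PySem.List.pyIdx? n i = none := by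
  have h0 : 0 ≤ i := le_trans (by positivity) h
  simp [PySem.List.pyIdx?, h0]; omega

theorem pvGetD_in {α : Type} (L : List α) (i : Int) (d0 : α) (h0 : 0 ≤ i) (h : i < (L.length : Int)) :
    PySem.List.pyGetD L i d0 = L.getD i.toNat d0 := by
  have hi : i.toNat < L.length := by omega
  simp [PySem.List.pyGetD, PySem.List.pyGet?, pvIdx_in L.length i h0 h,
        List.getD_eq_getElem?_getD]

theorem pvSetD_in {α : Type} (L : List α) (i : Int) (v : α) (h0 : 0 ≤ i) (h : i < (L.length : Int)) :
    PySem.List.pySetD L i v = L.set i.toNat v := by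
  simp [PySem.List.pySetD, PySem.List.pySet?, pvIdx_in L.length i h0 h]

theorem pvSetD_out {α : Type} (L : List α) (i : Int) (v : α) (h : (L.length : Int) ≤ i) :
    PySem.List.pySetD L i v = L := by
  simp [PySem.List.pySetD, PySem.List.pySet?, pvIdx_out L.length i h]

theorem pvSetD_getD_self {α : Type} (L : List α) (i : Int) (d0 : α) (h0 : 0 ≤ i) :
    PySem.List.pySetD L i (PySem.List.pyGetD L i d0) = L := by
  by_cases h : i < (L.length : Int)
  · have hi : i.toNat < L.length := by omega
    rw [pvSetD_in L i _ h0 h, pvGetD_in L i d0 h0 h, List.getD_eq_getElem L d0 hi,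
        List.set_getElem_self]
  · exact pvSetD_out _ _ _ (by omega)

-- list utilities
theorem pvMapRange {α : Type} (xs : List α) (d0 : α) :
    (List.range xs.length).map (fun i => xs.getD i d0) = xs := by
  apply List.ext_getElem (by simp)
  intro i h1 h2
  simp only [List.getElem_map, List.getElem_range]
  rw [List.getD_eq_getElem xs d0 (by simpa using h2)]

theorem pvTake_getD {α : Type} (xs : List α) (N c : Nat) (d0 : α) (hc : c < N) (hN : N ≤ xs.length) :
    (xs.take N).getD c d0 = xs.getD c d0 := by
  have h1 : c < (xs.take N).length := by simp; omega
  have h2 : c < xs.length := by omega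
  rw [List.getD_eq_getElem _ _ h1, List.getD_eq_getElem _ _ h2, List.getElem_take]

-- product folds
theorem pvProdIf {α β γ : Type} (c : Prop) [Decidable c] (x x' : α) (y y' : β) (z z' : γ) :
    (if c then (x, y, z) else (x', y', z')) =
      ((if c then x else x'), (if c then y else y'), (if c then z else z')) := by
  split_ifs <;> rfl

theorem pvFoldProd3 {β σ₁ σ₂ σ₃ : Type} (f : σ₁ → β → σ₁) (g : σ₂ → β → σ₂) (h : σ₃ → β → σ₃)
    (l : List β) (a : σ₁) (b : σ₂) (c : σ₃) :
    l.foldl (fun s e => (f s.1 e, g s.2.1 e, h s.2.2 e)) (a, b, c) =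
      (l.foldl f a, l.foldl g b, l.foldl h c) := by
  induction l generalizing a b c with
  | nil => rfl
  | cons x xs ih => simpa using ih (f a x) (g b x) (h c x)

-- fold of index-writes over a range
theorem pvFoldSet {α : Type} (d0 : α) (f : Int → α → α) (b : Int) :
    ∀ (n : Nat) (a : Int) (L : List α), 0 ≤ a → (b - a).toNat = n →
      ((PySem.List.pyRange a b 1).foldl
          (fun L l => PySem.List.pySetD L l (f l (PySem.List.pyGetD L l d0))) L).length = L.length ∧
      (∀ i : Nat, i < L.length →
        ((PySem.List.pyRange a b 1).foldl
            (fun L l => PySem.List.pySetD L l (f l (PySem.List.pyGetD L l d0))) L).getD i d0 =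
          if a ≤ (i : Int) ∧ (i : Int) < b then f i (L.getD i d0) else L.getD i d0) := by
  intro n
  induction n with
  | zero =>
    intro a L h0 hn
    rw [PySem.List.pyRange_one_eq_nil (by omega)]
    refine ⟨rfl, fun i hi => ?_⟩
    rw [if_neg (by omega)]
    rfl
  | succ n ih =>
    intro a L h0 hn
    have hab : a < b := by omega
    rw [PySem.List.pyRange_one_cons hab]
    simp only [List.foldl_cons]
    set L1 := PySem.List.pySetD L a (f a (PySem.List.pyGetD L a d0)) with hL1
    have hlen1 : L1.length = L.length := by
      by_cases h : a < (L.length : Int)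
      · rw [hL1, pvSetD_in L a _ h0 h, List.length_set]
      · rw [hL1, pvSetD_out L a _ (by omega)]
    obtain ⟨ihlen, ihpt⟩ := ih (a + 1) L1 (by omega) (by omega)
    constructor
    · rw [ihlen, hlen1]
    · intro i hi
      rw [ihpt i (by omega)]
      by_cases hia : (i : Int) = a
      · have hiL : i < L.length := hi
        have hinr : a < (L.length : Int) := by omega
        have hita : a.toNat = i := by omega
        have hset : L1 = L.set i (f a (L.getD i d0)) := by
          rw [hL1, pvGetD_in L a d0 h0 hinr, pvSetD_in L a _ h0 hinr, hita]
        have hL1g : L1.getD i d0 = f a (L.getD i d0) := by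
          rw [hset, List.getD_eq_getElem _ _ (by simpa using hiL), List.getElem_set_self]
        rw [if_neg (by omega), hL1g, if_pos (by omega), hia]
      · have hL1g : L1.getD i d0 = L.getD i d0 := by
          by_cases h : a < (L.length : Int)
          · rw [hL1, pvSetD_in L a _ h0 h,
                List.getD_eq_getElem _ _ (by simpa using hi),
                List.getD_eq_getElem _ _ hi]
            exact List.getElem_set_ne (by omega : a.toNat ≠ i) (by simpa using hi)
          · rw [hL1, pvSetD_out L a _ (by omega)]
        rw [hL1g]
        by_cases hc : a ≤ (i : Int) ∧ (i : Int) < b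
        · rw [if_pos (by omega), if_pos hc]
        · rw [if_neg (by omega), if_neg hc]

theorem pvFoldPointwise {α : Type} (d0 : α) (N : Nat) (T : List α → Int → List α)
    (g : Int → Nat → α → α)
    (hlen : ∀ C l, C.length = N → (T C l).length = N)
    (hpt : ∀ C (l : Int) (c : Nat), C.length = N → c < N → (T C l).getD c d0 = g l c (C.getD c d0)) :
    ∀ (ls : List Int) (C : List α), C.length = N →
      (ls.foldl T C).length = N ∧
      (∀ c : Nat, c < N → (ls.foldl T C).getD c d0 = ls.foldl (fun s l => g l c s) (C.getD c d0)) := by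
  intro ls
  induction ls with
  | nil => intro C hC; exact ⟨hC, fun c _ => rfl⟩
  | cons l ls ih =>
    intro C hC
    obtain ⟨ihlen, ihpt⟩ := ih (T C l) (hlen C l hC)
    refine ⟨ihlen, fun c hc => ?_⟩
    simp only [List.foldl_cons]
    rw [ihpt c hc, hpt C l c hC hc]

theorem pvRowFoldL (l : Int) (h0 : 0 ≤ l) :
    ∀ (vs : List Int) (L : List (List Int)),
      vs.foldl (fun L v => if v ≠ 0 then
          PySem.List.pySetD L l (PySem.Set.add (PySem.List.pyGetD L l []) v) else L) L =
        PySem.List.pySetD L l (vs.foldl pvCondAdd (PySem.List.pyGetD L l [])) := by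
  intro vs
  induction vs with
  | nil => intro L; exact (pvSetD_getD_self L l [] h0).symm
  | cons v vs ih =>
    intro L
    simp only [List.foldl_cons]
    by_cases hv : v ≠ 0
    · rw [if_pos hv]
      by_cases h : l < (L.length : Int)
      · set s := PySem.List.pyGetD L l []
        set L1 := PySem.List.pySetD L l (PySem.Set.add s v) with hL1
        rw [ih L1]
        have hlt : l.toNat < L.length := by omega
        have hg1 : PySem.List.pyGetD L1 l [] = PySem.Set.add s v := by
          rw [hL1, pvSetD_in L l _ h0 h, pvGetD_in _ l [] h0 (by simpa [List.length_set] using h)]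
          rw [List.getD_eq_getElem _ _ (by simpa [List.length_set] using hlt)]
          exact List.getElem_set_self _
        rw [hg1, hL1, pvSetD_in L l _ h0 h, pvSetD_in _ l _ h0 (by simpa [List.length_set] using h),
            List.set_set]
        rw [← pvSetD_in L l _ h0 h]
        have : pvCondAdd s v = PySem.Set.add s v := by simp [pvCondAdd, hv]
        rw [this]
      · have hout : (L.length : Int) ≤ l := by omega
        rw [pvSetD_out L l _ hout, ih L, pvSetD_out L l _ hout, pvSetD_out L l _ hout]
    · rw [if_neg hv]
      rw [ih L]
      have : pvCondAdd (PySem.List.pyGetD L l []) v = PySem.List.pyGetD L l [] := by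
        simp [pvCondAdd, hv]
      rw [this]

theorem pvCondAdd_foldl : ∀ (vs : List Int) (s : List Int),
    vs.foldl pvCondAdd s = (vs.filter (fun v => v != 0)).foldl PySem.Set.add s := by
  intro vs
  induction vs with
  | nil => intro s; rfl
  | cons v vs ih =>
    intro s
    simp only [List.foldl_cons, List.filter_cons]
    by_cases hv : v = 0
    · subst hv
      simp [pvCondAdd, ih]
    · have hb : (v != 0) = true := by simpa using hv
      simp only [hb, if_true]
      simp only [List.foldl_cons]
      rw [ih]
      congr 1
      simp [pvCondAdd, hv]

-- dict lemmas
theorem pvKeys_stepA (d : PySem.Dict Int (List Int)) (q : Int × Int) :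
    (pvStepA d q).keys = PySem.Set.add d.keys q.1 := by
  unfold pvStepA
  by_cases hc : d.contains q.1
  · have hmem : q.1 ∈ d.keys := (PySem.Dict.contains_iff_mem_keys d q.1).mp hc
    have hd1 : (if ¬ d.contains q.1 = true then d.insert q.1 ([] : List Int) else d) = d := by
      simp [hc]
    rw [hd1]
    by_cases hv : q.2 ≠ 0
    · rw [if_pos hv, PySem.Dict.keys_modify, PySem.Dict.keys_insert_of_contains _ _ hc,
          PySem.Set.add_of_mem hmem]
    · rw [if_neg hv, PySem.Set.add_of_mem hmem]
  · have hcf : d.contains q.1 = false := by simpa using hc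
    have hmem : q.1 ∉ d.keys := fun h => hc ((PySem.Dict.contains_iff_mem_keys d q.1).mpr h)
    have hk1 : (d.insert q.1 ([] : List Int)).keys = d.keys ++ [q.1] :=
      PySem.Dict.keys_insert_of_not_contains d [] hcf
    have hc1 : (d.insert q.1 ([] : List Int)).contains q.1 = true := by
      rw [PySem.Dict.contains_insert]; simp
    have hd1 : (if ¬ d.contains q.1 = true then d.insert q.1 ([] : List Int) else d)
        = d.insert q.1 [] := by simp [hcf]
    rw [hd1]
    by_cases hv : q.2 ≠ 0
    · rw [if_pos hv, PySem.Dict.keys_modify, PySem.Dict.keys_insert_of_contains _ _ hc1, hk1,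
          PySem.Set.add_of_not_mem hmem]
    · rw [if_neg hv, hk1, PySem.Set.add_of_not_mem hmem]

theorem pvKeys_foldA : ∀ (cs : List (Int × Int)) (d : PySem.Dict Int (List Int)),
    (cs.foldl pvStepA d).keys = PySem.Set.update d.keys (cs.map Prod.fst) := by
  intro cs
  induction cs with
  | nil => intro d; simp [PySem.Set.update]
  | cons q cs ih =>
    intro d
    simp only [List.foldl_cons, List.map_cons, PySem.Set.update_cons]
    rw [ih, pvKeys_stepA]

theorem pvP1_append (ns : List Int) (n : Int) :
    pvP1 (ns ++ [n]) = (pvP1 ns).insert n [] := by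
  simp [pvP1, List.foldl_append]

theorem pvP1_keys (ns : List Int) : (pvP1 ns).keys = PySem.Set.ofList ns := by
  have h := PySem.Dict.keys_foldl_insert ns (fun _ _ => ([] : List Int)) PySem.Dict.empty
  simpa [pvP1, PySem.Dict.keys_empty, PySem.Set.update_nil_left] using h

theorem pvP1_nodup (ns : List Int) : (pvP1 ns).keys.Nodup := by
  have h := PySem.Dict.nodup_keys_foldl_insert ns (fun _ _ => ([] : List Int)) PySem.Dict.empty
    (by simp [PySem.Dict.keys_empty])
  simpa [pvP1] using h

theorem pvP1_get? (ns : List Int) (k : Int) :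
    (pvP1 ns).get? k = if k ∈ ns then some ([] : List Int) else none := by
  induction ns using List.reverseRecOn with
  | nil => simp [pvP1, PySem.Dict.get?_empty]
  | append_singleton ns n ih =>
    rw [pvP1_append, PySem.Dict.get?_insert]
    by_cases hk : k = n
    · subst hk; simp
    · rw [if_neg hk, ih]
      simp [hk]

theorem pvInsert_same (d : PySem.Dict Int (List Int)) (k : Int) (v : List Int)
    (hnd : d.keys.Nodup) (h : d.get? k = some v) : d.insert k v = d := by
  have hmem : (k, v) ∈ d.items := PySem.Dict.mem_items_of_get?_eq_some d h
  have hc : d.contains k = true :=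
    (PySem.Dict.contains_iff_mem_keys d k).mpr (PySem.Dict.mem_keys_of_mem_items d hmem)
  apply PySem.Dict.ext
  rw [PySem.Dict.items_insert_of_contains _ _ hc]
  conv_rhs => rw [← List.map_id d.items]
  apply List.map_congr_left
  intro p hp
  by_cases hpk : p.1 = k
  · have hg : d.get? p.1 = some p.2 := PySem.Dict.get?_of_mem_items d hp hnd
    rw [hpk, h] at hg
    have h2 : p.2 = v := by injection hg with h2; exact h2.symm
    have hpv : p = (k, v) := Prod.ext hpk h2
    rw [hpv]
    simp
  · simp [hpk]

theorem pvInsert_comm (d : PySem.Dict Int (List Int)) (k n : Int) (v w : List Int)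
    (hk : d.contains k = true) (hn : d.contains n = false) (hkn : k ≠ n) :
    (d.insert n w).insert k v = (d.insert k v).insert n w := by
  have hkn' : (k == n) = false := by simpa using hkn
  have hnk' : (n == k) = false := by simpa using (Ne.symm hkn)
  have hcnk : (d.insert n w).contains k = true := by
    rw [PySem.Dict.contains_insert, hkn']; simpa using hk
  have hcn2 : (d.insert k v).contains n = false := by
    rw [PySem.Dict.contains_insert, hnk']; simpa using hn
  apply PySem.Dict.ext
  rw [PySem.Dict.items_insert_of_contains _ _ hcnk,
      PySem.Dict.items_insert_of_not_contains _ _ hn,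
      PySem.Dict.items_insert_of_not_contains _ _ hcn2,
      PySem.Dict.items_insert_of_contains _ _ hk]
  rw [List.map_append]
  simp [Ne.symm hkn]

theorem pvStepM_insert_comm (d : PySem.Dict Int (List Int)) (n : Int) (q : Int × Int)
    (hq : d.contains q.1 = true) (hn : d.contains n = false) :
    pvStepM (d.insert n []) q = (pvStepM d q).insert n [] := by
  have hqn : q.1 ≠ n := fun h => by rw [h] at hq; rw [hq] at hn; exact Bool.noConfusion hn
  unfold pvStepM
  by_cases hv : q.2 ≠ 0
  · rw [if_pos hv, if_pos hv]
    simp only [PySem.Dict.modify]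
    rw [PySem.Dict.getD_insert]
    rw [if_neg hqn]
    exact pvInsert_comm d q.1 n _ [] hq hn hqn
  · rw [if_neg hv, if_neg hv]

theorem pvContains_stepM (d : PySem.Dict Int (List Int)) (q : Int × Int) (x : Int)
    (hq : d.contains q.1 = true) :
    (pvStepM d q).contains x = d.contains x := by
  unfold pvStepM
  by_cases hv : q.2 ≠ 0
  · rw [if_pos hv]
    simp only [PySem.Dict.modify]
    rw [PySem.Dict.contains_insert]
    by_cases hx : x = q.1
    · subst hx; simp [hq]
    · simp [hx]
  · rw [if_neg hv]

theorem pvCommute : ∀ (cs : List (Int × Int)) (d : PySem.Dict Int (List Int)) (n : Int),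
    d.contains n = false → (∀ q ∈ cs, d.contains q.1 = true) →
    cs.foldl pvStepM (d.insert n []) = (cs.foldl pvStepM d).insert n [] := by
  intro cs
  induction cs with
  | nil => intro d n _ _; rfl
  | cons q cs ih =>
    intro d n hn hall
    simp only [List.foldl_cons]
    rw [pvStepM_insert_comm d n q (hall q (by simp)) hn]
    apply ih
    · rw [pvContains_stepM d q n (hall q (by simp))]; exact hn
    · intro q' hq'
      rw [pvContains_stepM d q q'.1 (hall q (by simp))]
      exact hall q' (by simp [hq'])

theorem pvStepA_of_contains (d : PySem.Dict Int (List Int)) (q : Int × Int)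
    (hc : d.contains q.1 = true) : pvStepA d q = pvStepM d q := by
  unfold pvStepA pvStepM
  have hd1 : (if ¬ d.contains q.1 = true then d.insert q.1 ([] : List Int) else d) = d := by
    simp [hc]
  rw [hd1]

theorem pvStepA_of_not_contains (d : PySem.Dict Int (List Int)) (q : Int × Int)
    (hc : d.contains q.1 = false) : pvStepA d q = pvStepM (d.insert q.1 []) q := by
  unfold pvStepA pvStepM
  have hd1 : (if ¬ d.contains q.1 = true then d.insert q.1 ([] : List Int) else d)
      = d.insert q.1 [] := by simp [hc]
  rw [hd1]

theorem pvCageMain : ∀ (cells : List (Int × Int)),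
    cells.foldl pvStepA PySem.Dict.empty = cells.foldl pvStepM (pvP1 (cells.map Prod.fst)) := by
  intro cells
  induction cells using List.reverseRecOn with
  | nil => rfl
  | append_singleton cs q ih =>
    rw [List.foldl_append, List.foldl_append, List.map_append]
    simp only [List.map_cons, List.map_nil]
    rw [pvP1_append]
    simp only [List.foldl_cons, List.foldl_nil]
    by_cases hmem : q.1 ∈ cs.map Prod.fst
    · have hsame : (pvP1 (cs.map Prod.fst)).insert q.1 [] = pvP1 (cs.map Prod.fst) := by
        apply pvInsert_same _ _ _ (pvP1_nodup _)
        rw [pvP1_get?, if_pos hmem]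
      rw [hsame, ← ih]
      have hc : (cs.foldl pvStepA PySem.Dict.empty).contains q.1 = true := by
        rw [PySem.Dict.contains_iff_mem_keys, pvKeys_foldA, PySem.Dict.keys_empty,
            PySem.Set.update_nil_left, PySem.Set.mem_ofList]
        exact hmem
      exact pvStepA_of_contains _ _ hc
    · have hcf : (pvP1 (cs.map Prod.fst)).contains q.1 = false := by
        rw [← Bool.not_eq_true, PySem.Dict.contains_iff_mem_keys, pvP1_keys, PySem.Set.mem_ofList]
        exact hmem
      rw [pvCommute cs _ q.1 hcf (fun q' hq' => by
        rw [PySem.Dict.contains_iff_mem_keys, pvP1_keys, PySem.Set.mem_ofList]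
        exact List.mem_map_of_mem hq')]
      rw [← ih]
      have hc : (cs.foldl pvStepA PySem.Dict.empty).contains q.1 = false := by
        rw [← Bool.not_eq_true, PySem.Dict.contains_iff_mem_keys, pvKeys_foldA,
            PySem.Dict.keys_empty, PySem.Set.update_nil_left, PySem.Set.mem_ofList]
        exact hmem
      exact pvStepA_of_not_contains _ _ hc

-- structure of port A
theorem pvPortA (grille plan_cage : List (List Int)) (dimension : Int) :
    initialiser_contraintes grille plan_cage dimension =
      ((PySem.List.pyRange 0 dimension 1).foldl
          (fun L l => (PySem.List.pyRange 0 dimension 1).foldl (pvBL grille l) L)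
          ((PySem.List.pyRange 0 dimension 1).map (fun _ => ([] : List Int))),
       (PySem.List.pyRange 0 dimension 1).foldl
          (fun C l => (PySem.List.pyRange 0 dimension 1).foldl (pvBC grille l) C)
          ((PySem.List.pyRange 0 dimension 1).map (fun _ => ([] : List Int))),
       ((PySem.List.pyRange 0 dimension 1).foldl
          (fun D l => (PySem.List.pyRange 0 dimension 1).foldl (pvBD grille plan_cage l) D)
          (PySem.Dict.empty : PySem.Dict Int (List Int))).items) := by
  have hbody : ∀ l : Int,
      (fun (st : List (List Int) × List (List Int) × PySem.Dict Int (List Int)) (c : Int) =>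
        let val := PySem.List.pyGetD (PySem.List.pyGetD grille l []) c 0
        let num := PySem.List.pyGetD (PySem.List.pyGetD plan_cage l []) c 0
        let cages := if ¬ st.2.2.contains num then st.2.2.insert num [] else st.2.2
        if val ≠ 0 then
          (PySem.List.pySetD st.1 l (PySem.Set.add (PySem.List.pyGetD st.1 l []) val),
           PySem.List.pySetD st.2.1 c (PySem.Set.add (PySem.List.pyGetD st.2.1 c []) val),
           cages.modify num [] (fun s => PySem.Set.add s val))
        else (st.1, st.2.1, cages)) =
      (fun st c => (pvBL grille l st.1 c, pvBC grille l st.2.1 c,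
        pvBD grille plan_cage l st.2.2 c)) := by
    intro l
    funext st c
    simp only [pvBL, pvBC, pvBD, pvStepA, pvG]
    rw [pvProdIf]
  have houter : (fun (st : List (List Int) × List (List Int) × PySem.Dict Int (List Int)) (l : Int) =>
      (PySem.List.pyRange 0 dimension 1).foldl
        (fun st c => (pvBL grille l st.1 c, pvBC grille l st.2.1 c,
          pvBD grille plan_cage l st.2.2 c)) st) =
      (fun st l =>
        ((PySem.List.pyRange 0 dimension 1).foldl (pvBL grille l) st.1,
         (PySem.List.pyRange 0 dimension 1).foldl (pvBC grille l) st.2.1,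
         (PySem.List.pyRange 0 dimension 1).foldl (pvBD grille plan_cage l) st.2.2)) := by
    funext st l
    conv_lhs => rw [← Prod.mk.eta (p := st), ← Prod.mk.eta (p := st.2)]
    rw [pvFoldProd3]
  unfold initialiser_contraintes
  simp only [hbody, houter]
  rw [pvFoldProd3 (fun L (l : Int) => (PySem.List.pyRange 0 dimension 1).foldl (pvBL grille l) L)
      (fun C (l : Int) => (PySem.List.pyRange 0 dimension 1).foldl (pvBC grille l) C)
      (fun D (l : Int) => (PySem.List.pyRange 0 dimension 1).foldl (pvBD grille plan_cage l) D)]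

theorem pvZipStar_rect (rows : List (List Int)) (N : Nat) (hN : 0 < N)
    (hlen : rows.length = N) (hr : ∀ r ∈ rows, r.length = N) :
    pvZipStar rows = (List.range N).map (fun c => rows.map (fun r => r.getD c 0)) := by
  obtain ⟨r, rs, rfl⟩ : ∃ r rs, rows = r :: rs := by
    cases rows with
    | nil => simp at hlen; omega
    | cons r rs => exact ⟨r, rs, rfl⟩
  have haux : ∀ (ts : List (List Int)) (m : Nat), m = N → (∀ t ∈ ts, t.length = N) →
      ts.foldl (fun m t => min m t.length) m = N := by
    intro ts
    induction ts with
    | nil => intro m hm _; exact hm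
    | cons t ts ih =>
      intro m hm hts
      simp only [List.foldl_cons]
      exact ih _ (by rw [hm, hts t (by simp)]; exact min_self N)
        (fun t' ht' => hts t' (by simp [ht']))
  have hmin : rs.foldl (fun m t => min m t.length) r.length = N :=
    haux rs r.length (hr r (by simp)) (fun t ht => hr t (by simp [ht]))
  show (List.range (rs.foldl (fun m t => min m t.length) r.length)).map
      (fun c => (r :: rs).map (fun t => t.getD c 0)) = _
  rw [hmin]

theorem pvRangeMapGetD (xs : List Int) (N : Nat) (hN : N ≤ xs.length) :
    (PySem.List.pyRange 0 (N : Int) 1).map (fun c => PySem.List.pyGetD xs c 0) = xs.take N := by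
  rw [PySem.List.pyRange_one, List.map_map]
  apply List.ext_getElem (by simp [Nat.min_eq_left hN])
  intro i h1 h2
  simp only [List.getElem_map, List.getElem_range, Function.comp_apply, zero_add,
    PySem.List.pyGetD_natCast, List.getElem_take]
  rw [List.getD_eq_getElem xs 0 (by simp at h1; omega)]

theorem pvRangeMapPair (as bs : List Int) (N : Nat) (ha : N ≤ as.length) (hb : N ≤ bs.length) :
    (PySem.List.pyRange 0 (N : Int) 1).map
        (fun c => (PySem.List.pyGetD as c 0, PySem.List.pyGetD bs c 0)) =
      List.zip (as.take N) (bs.take N) := by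
  rw [PySem.List.pyRange_one, List.map_map]
  apply List.ext_getElem (by simp [Nat.min_eq_left ha, Nat.min_eq_left hb])
  intro i h1 h2
  have hiN : i < N := by simp at h1; omega
  simp only [List.getElem_map, List.getElem_range, Function.comp_apply, zero_add,
    PySem.List.pyGetD_natCast, List.getElem_zip, List.getElem_take]
  rw [List.getD_eq_getElem as 0 (by omega), List.getD_eq_getElem bs 0 (by omega)]

theorem pvZipAsRange {α β : Type} (as : List α) (bs : List β) (da : α) (db : β) (N : Nat)
    (ha : as.length = N) (hb : bs.length = N) :
    List.zip as bs = (List.range N).map (fun i => (as.getD i da, bs.getD i db)) := by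
  apply List.ext_getElem (by simp [ha, hb])
  intro i h1 h2
  have hiN : i < N := by simpa using h2
  simp only [List.getElem_map, List.getElem_range, List.getElem_zip]
  rw [List.getD_eq_getElem as da (by omega), List.getD_eq_getElem bs db (by omega)]

theorem pvRangeMapCast {α : Type} (N : Nat) (f : Int → α) :
    (PySem.List.pyRange 0 (N : Int) 1).map f = (List.range N).map (fun (i : Nat) => f (i : Int)) := by
  rw [PySem.List.pyRange_one, List.map_map]
  simp only [sub_zero, Int.toNat_natCast]
  apply List.map_congr_left
  intro k _
  simp

theorem pvTrim_length (m : List (List Int)) (N : Nat) (h : N ≤ m.length) :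
    (pvTrim m N).length = N := by
  simp [pvTrim, Nat.min_eq_left h]

theorem pvTrim_mem_length (m : List (List Int)) (N : Nat)
    (h : ∀ r ∈ m.take N, N ≤ r.length) : ∀ r ∈ pvTrim m N, r.length = N := by
  intro r hr
  obtain ⟨r', hr', rfl⟩ := List.mem_map.mp hr
  simp [Nat.min_eq_left (h r' hr')]

theorem pvTrim_getD (m : List (List Int)) (N i : Nat) (hm : N ≤ m.length) (hi : i < N) :
    (pvTrim m N).getD i [] = (m.getD i []).take N := by
  have h2 : i < (pvTrim m N).length := by rw [pvTrim_length m N hm]; omega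
  have h3 : i < m.length := by omega
  rw [List.getD_eq_getElem _ _ h2, List.getD_eq_getElem _ _ h3]
  simp [pvTrim, List.getElem_take]

theorem pvRow_length (m : List (List Int)) (N i : Nat)
    (hm : N ≤ m.length) (h : ∀ r ∈ m.take N, N ≤ r.length) (hi : i < N) :
    N ≤ (m.getD i []).length := by
  have h3 : i < m.length := by omega
  rw [List.getD_eq_getElem _ _ h3]
  have : m[i] ∈ m.take N := by
    have h4 : i < (m.take N).length := by simp [Nat.min_eq_left hm]; omega
    have : (m.take N)[i] = m[i] := List.getElem_take
    rw [← this]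
    exact List.getElem_mem h4
  exact h _ this

def pvCanon (grille plan_cage : List (List Int)) (N : Nat) :
    List (List Int) × List (List Int) × (List (Int × List Int)) :=
  ((pvTrim grille N).map (fun row => PySem.Set.ofList (row.filter (fun v => v != 0))),
   (List.range N).map (fun c => PySem.Set.ofList
     (((pvTrim grille N).map (fun r => r.getD c 0)).filter (fun v => v != 0))),
   ((((List.range N).map (fun i =>
        List.zip ((pvTrim plan_cage N).getD i []) ((pvTrim grille N).getD i []))).flatten).foldl
      pvStepM (pvP1 (pvTrim plan_cage N).flatten)).items)

theorem pvAside (grille plan_cage : List (List Int)) (dimension : Int)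
    (h0d : 0 < dimension)
    (hg : dimension.toNat ≤ grille.length) (hp : dimension.toNat ≤ plan_cage.length)
    (hgr : ∀ r ∈ grille.take dimension.toNat, dimension.toNat ≤ r.length)
    (hpr : ∀ r ∈ plan_cage.take dimension.toNat, dimension.toNat ≤ r.length) :
    initialiser_contraintes grille plan_cage dimension =
      pvCanon grille plan_cage dimension.toNat := by
  obtain ⟨N, rfl⟩ : ∃ N : Nat, dimension = (N : Int) := ⟨dimension.toNat, by omega⟩
  simp only [Int.toNat_natCast] at hg hp hgr hpr ⊢
  have hN : 0 < N := by omega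
  have hG2len : (pvTrim grille N).length = N := pvTrim_length _ _ hg
  have hP2len : (pvTrim plan_cage N).length = N := pvTrim_length _ _ hp
  have hG2r : ∀ r ∈ pvTrim grille N, r.length = N := pvTrim_mem_length _ _ hgr
  have hP2r : ∀ r ∈ pvTrim plan_cage N, r.length = N := pvTrim_mem_length _ _ hpr
  have hRlen : (PySem.List.pyRange 0 (N : Int) 1).length = N := by
    rw [PySem.List.length_pyRange_one]; omega
  have hL0len : ((PySem.List.pyRange 0 (N : Int) 1).map (fun _ => ([] : List Int))).length = N := by
    simp [hRlen]
  have hL0get : ∀ i : Nat, i < N →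
      ((PySem.List.pyRange 0 (N : Int) 1).map (fun _ => ([] : List Int))).getD i [] = [] := by
    intro i hi
    rw [List.getD_eq_getElem _ _ (by rw [hL0len]; omega)]
    simp
  have hofl : ∀ vs : List Int,
      vs.foldl pvCondAdd [] = PySem.Set.ofList (vs.filter (fun v => v != 0)) := by
    intro vs; rw [pvCondAdd_foldl]; rfl
  have hrowvals : ∀ i : Nat, i < N →
      (PySem.List.pyRange 0 (N : Int) 1).map (fun c => pvG grille (i : Int) c) =
        (pvTrim grille N).getD i [] := by
    intro i hi
    have hfun : (fun c => pvG grille (i : Int) c) =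
        (fun c => PySem.List.pyGetD (grille.getD i []) c 0) := by
      funext c; simp [pvG, PySem.List.pyGetD_natCast]
    rw [hfun, pvRangeMapGetD _ _ (pvRow_length grille N i hg hgr hi),
        pvTrim_getD grille N i hg hi]
  have hcolvals : ∀ c : Nat, c < N →
      (PySem.List.pyRange 0 (N : Int) 1).map (fun l => pvG grille l (c : Int)) =
        (pvTrim grille N).map (fun r => r.getD c 0) := by
    intro c hc
    rw [pvRangeMapCast N (fun l => pvG grille l (c : Int))]
    apply List.ext_getElem (by simp [pvTrim_length grille N hg])
    intro i h1 h2
    have hiN : i < N := by simpa using h1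
    simp only [List.getElem_map, List.getElem_range]
    rw [show pvG grille (i : Int) (c : Int) = (grille.getD i []).getD c 0 from by
      simp [pvG, PySem.List.pyGetD_natCast]]
    rw [← List.getD_eq_getElem (pvTrim grille N) [] (by rw [hG2len]; omega),
        pvTrim_getD grille N i hg hiN,
        pvTake_getD _ N c 0 hc (pvRow_length grille N i hg hgr hiN)]
  -- lignes component
  have hBLrow : ∀ (L : List (List Int)) (l : Int), l ∈ PySem.List.pyRange 0 (N : Int) 1 →
      (PySem.List.pyRange 0 (N : Int) 1).foldl (pvBL grille l) L =
        PySem.List.pySetD L l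
          (((PySem.List.pyRange 0 (N : Int) 1).map (fun c => pvG grille l c)).foldl pvCondAdd
            (PySem.List.pyGetD L l [])) := by
    intro L l hl
    have h0 : 0 ≤ l := (PySem.List.mem_pyRange_one.mp hl).1
    rw [← pvRowFoldL l h0 ((PySem.List.pyRange 0 (N : Int) 1).map (fun c => pvG grille l c)) L,
        List.foldl_map]
    rfl
  have hFoldL : (PySem.List.pyRange 0 (N : Int) 1).foldl
      (fun L l => (PySem.List.pyRange 0 (N : Int) 1).foldl (pvBL grille l) L)
      ((PySem.List.pyRange 0 (N : Int) 1).map (fun _ => ([] : List Int))) =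
      (PySem.List.pyRange 0 (N : Int) 1).foldl
      (fun L l => PySem.List.pySetD L l
        (((PySem.List.pyRange 0 (N : Int) 1).map (fun c => pvG grille l c)).foldl pvCondAdd
          (PySem.List.pyGetD L l [])))
      ((PySem.List.pyRange 0 (N : Int) 1).map (fun _ => ([] : List Int))) :=
    PySem.List.foldl_congr_mem _ _ _ _ (fun acc x hx => hBLrow acc x hx)
  obtain ⟨hL1, hL2⟩ := pvFoldSet ([] : List Int)
    (fun l s => ((PySem.List.pyRange 0 (N : Int) 1).map (fun c => pvG grille l c)).foldl pvCondAdd s)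
    (N : Int) ((N : Int) - 0).toNat 0
    ((PySem.List.pyRange 0 (N : Int) 1).map (fun _ => ([] : List Int))) le_rfl rfl
  have hLcomp : (PySem.List.pyRange 0 (N : Int) 1).foldl
      (fun L l => (PySem.List.pyRange 0 (N : Int) 1).foldl (pvBL grille l) L)
      ((PySem.List.pyRange 0 (N : Int) 1).map (fun _ => ([] : List Int))) =
      (pvTrim grille N).map (fun row => PySem.Set.ofList (row.filter (fun v => v != 0))) := by
    rw [hFoldL]
    apply List.ext_getElem (by rw [hL1, hL0len]; simp [pvTrim_length grille N hg])
    intro i h1 h2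
    have hiN : i < N := by simpa [pvTrim_length grille N hg] using h2
    rw [← List.getD_eq_getElem _ ([] : List Int) h1, hL2 i (by rw [hL0len]; omega),
        if_pos (by constructor <;> omega), hL0get i hiN, hrowvals i hiN, hofl,
        List.getElem_map, ← List.getD_eq_getElem (pvTrim grille N) []
          (by rw [pvTrim_length grille N hg]; omega)]
  -- cols component
  have hBCcell : ∀ (l : Int) (C : List (List Int)) (c : Int),
      c ∈ PySem.List.pyRange 0 (N : Int) 1 →
      pvBC grille l C c =
        PySem.List.pySetD C c (pvCondAdd (PySem.List.pyGetD C c []) (pvG grille l c)) := by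
    intro l C c hc
    have h0c : 0 ≤ c := (PySem.List.mem_pyRange_one.mp hc).1
    unfold pvBC pvCondAdd
    by_cases hv : pvG grille l c ≠ 0
    · rw [if_pos hv, if_pos hv]
    · rw [if_neg hv, if_neg hv, pvSetD_getD_self C c [] h0c]
  have hBCrow : ∀ (C : List (List Int)) (l : Int),
      (PySem.List.pyRange 0 (N : Int) 1).foldl (pvBC grille l) C =
      (PySem.List.pyRange 0 (N : Int) 1).foldl
        (fun C c => PySem.List.pySetD C c
          (pvCondAdd (PySem.List.pyGetD C c []) (pvG grille l c))) C :=
    fun C l => PySem.List.foldl_congr_mem _ _ _ _ (fun acc c hc => hBCcell l acc c hc)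
  have hTlen : ∀ (C : List (List Int)) (l : Int), C.length = N →
      ((PySem.List.pyRange 0 (N : Int) 1).foldl
        (fun C c => PySem.List.pySetD C c
          (pvCondAdd (PySem.List.pyGetD C c []) (pvG grille l c))) C).length = N := by
    intro C l hC
    rw [(pvFoldSet ([] : List Int) (fun c s => pvCondAdd s (pvG grille l c))
      (N : Int) ((N : Int) - 0).toNat 0 C le_rfl rfl).1, hC]
  have hTpt : ∀ (C : List (List Int)) (l : Int) (c : Nat), C.length = N → c < N →
      ((PySem.List.pyRange 0 (N : Int) 1).foldl
        (fun C c => PySem.List.pySetD C c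
          (pvCondAdd (PySem.List.pyGetD C c []) (pvG grille l c))) C).getD c [] =
      pvCondAdd (C.getD c []) (pvG grille l (c : Int)) := by
    intro C l c hC hc
    rw [(pvFoldSet ([] : List Int) (fun c s => pvCondAdd s (pvG grille l c))
      (N : Int) ((N : Int) - 0).toNat 0 C le_rfl rfl).2 c (by omega),
      if_pos (by constructor <;> omega)]
  obtain ⟨hC1, hC2⟩ := pvFoldPointwise ([] : List Int) N
    (fun C l => (PySem.List.pyRange 0 (N : Int) 1).foldl
      (fun C c => PySem.List.pySetD C c
        (pvCondAdd (PySem.List.pyGetD C c []) (pvG grille l c))) C)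
    (fun l c s => pvCondAdd s (pvG grille l (c : Int)))
    hTlen hTpt (PySem.List.pyRange 0 (N : Int) 1)
    ((PySem.List.pyRange 0 (N : Int) 1).map (fun _ => ([] : List Int))) hL0len
  have hCcomp : (PySem.List.pyRange 0 (N : Int) 1).foldl
      (fun C l => (PySem.List.pyRange 0 (N : Int) 1).foldl (pvBC grille l) C)
      ((PySem.List.pyRange 0 (N : Int) 1).map (fun _ => ([] : List Int))) =
      (List.range N).map (fun c => PySem.Set.ofList
        (((pvTrim grille N).map (fun r => r.getD c 0)).filter (fun v => v != 0))) := by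
    rw [show (fun (C : List (List Int)) (l : Int) =>
        (PySem.List.pyRange 0 (N : Int) 1).foldl (pvBC grille l) C) =
        (fun C l => (PySem.List.pyRange 0 (N : Int) 1).foldl
          (fun C c => PySem.List.pySetD C c
            (pvCondAdd (PySem.List.pyGetD C c []) (pvG grille l c))) C) from
      funext fun C => funext fun l => hBCrow C l]
    apply List.ext_getElem (by rw [hC1]; simp)
    intro c h1 h2
    have hcN : c < N := by simpa using h2
    rw [← List.getD_eq_getElem _ ([] : List Int) h1, hC2 c hcN, hL0get c hcN]
    rw [show (PySem.List.pyRange 0 (N : Int) 1).foldl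
        (fun s l => pvCondAdd s (pvG grille l (c : Int))) [] =
        ((PySem.List.pyRange 0 (N : Int) 1).map (fun l => pvG grille l (c : Int))).foldl
          pvCondAdd [] from (List.foldl_map).symm]
    rw [hcolvals c hcN, hofl, List.getElem_map, List.getElem_range]
  -- cages component
  have hADinner : ∀ (D : PySem.Dict Int (List Int)) (l : Int),
      (PySem.List.pyRange 0 (N : Int) 1).foldl (pvBD grille plan_cage l) D =
      ((PySem.List.pyRange 0 (N : Int) 1).map
        (fun c => (pvG plan_cage l c, pvG grille l c))).foldl pvStepA D := by
    intro D l
    rw [List.foldl_map]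
    rfl
  have hAD : (PySem.List.pyRange 0 (N : Int) 1).foldl
      (fun D l => (PySem.List.pyRange 0 (N : Int) 1).foldl (pvBD grille plan_cage l) D)
      PySem.Dict.empty =
      (((PySem.List.pyRange 0 (N : Int) 1).map
        (fun l => (PySem.List.pyRange 0 (N : Int) 1).map
          (fun c => (pvG plan_cage l c, pvG grille l c)))).flatten).foldl pvStepA
        PySem.Dict.empty := by
    rw [List.foldl_flatten, List.foldl_map]
    exact PySem.List.foldl_congr_mem _ _ _ _ (fun acc l _ => hADinner acc l)
  have hcellrows : (PySem.List.pyRange 0 (N : Int) 1).map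
      (fun l => (PySem.List.pyRange 0 (N : Int) 1).map
        (fun c => (pvG plan_cage l c, pvG grille l c))) =
      (List.range N).map (fun i =>
        List.zip ((pvTrim plan_cage N).getD i []) ((pvTrim grille N).getD i [])) := by
    rw [pvRangeMapCast N]
    apply List.map_congr_left
    intro i hi
    have hiN : i < N := List.mem_range.mp hi
    have hfun : (fun c => (pvG plan_cage (i : Int) c, pvG grille (i : Int) c)) =
        (fun c => (PySem.List.pyGetD (plan_cage.getD i []) c 0,
          PySem.List.pyGetD (grille.getD i []) c 0)) := by
      funext c; simp [pvG, PySem.List.pyGetD_natCast]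
    rw [hfun, pvRangeMapPair _ _ N (pvRow_length plan_cage N i hp hpr hiN)
        (pvRow_length grille N i hg hgr hiN),
        pvTrim_getD plan_cage N i hp hiN, pvTrim_getD grille N i hg hiN]
  have hlenP2row : ∀ i : Nat, i < N → ((pvTrim plan_cage N).getD i []).length = N := by
    intro i hi
    rw [List.getD_eq_getElem _ _ (by rw [hP2len]; omega)]
    exact hP2r _ (List.getElem_mem _)
  have hlenG2row : ∀ i : Nat, i < N → ((pvTrim grille N).getD i []).length = N := by
    intro i hi
    rw [List.getD_eq_getElem _ _ (by rw [hG2len]; omega)]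
    exact hG2r _ (List.getElem_mem _)
  have hcellsfst : (((List.range N).map (fun i =>
      List.zip ((pvTrim plan_cage N).getD i []) ((pvTrim grille N).getD i []))).flatten).map
        Prod.fst = (pvTrim plan_cage N).flatten := by
    rw [List.map_flatten, List.map_map]
    rw [List.map_congr_left (fun i hi => by
      have hiN : i < N := List.mem_range.mp hi
      show (List.map Prod.fst ∘ fun i =>
        List.zip ((pvTrim plan_cage N).getD i []) ((pvTrim grille N).getD i [])) i =
        (pvTrim plan_cage N).getD i []
      simp only [Function.comp_apply]
      exact List.map_fst_zip (by rw [hlenP2row i hiN, hlenG2row i hiN]))]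
    conv_rhs => rw [← pvMapRange (pvTrim plan_cage N) [], hP2len]
  have hDcomp : (PySem.List.pyRange 0 (N : Int) 1).foldl
      (fun D l => (PySem.List.pyRange 0 (N : Int) 1).foldl (pvBD grille plan_cage l) D)
      PySem.Dict.empty =
      (((List.range N).map (fun i =>
        List.zip ((pvTrim plan_cage N).getD i []) ((pvTrim grille N).getD i []))).flatten).foldl
        pvStepM (pvP1 (pvTrim plan_cage N).flatten) := by
    rw [hAD, hcellrows, pvCageMain, hcellsfst]
  rw [pvPortA]
  unfold pvCanon
  exact Prod.ext hLcomp (Prod.ext hCcomp (congrArg PySem.Dict.items hDcomp))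

theorem pvBside (grille plan_cage : List (List Int)) (dimension : Int)
    (h0d : 0 < dimension)
    (hg : dimension.toNat ≤ grille.length) (hp : dimension.toNat ≤ plan_cage.length)
    (hgr : ∀ r ∈ grille.take dimension.toNat, dimension.toNat ≤ r.length)
    (hpr : ∀ r ∈ plan_cage.take dimension.toNat, dimension.toNat ≤ r.length) :
    initialiser_contraintes_alt grille plan_cage dimension =
      pvCanon grille plan_cage dimension.toNat := by
  obtain ⟨N, rfl⟩ : ∃ N : Nat, dimension = (N : Int) := ⟨dimension.toNat, by omega⟩
  simp only [Int.toNat_natCast] at hg hp hgr hpr ⊢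
  have hN : 0 < N := by omega
  have hG2len : (pvTrim grille N).length = N := pvTrim_length _ _ hg
  have hP2len : (pvTrim plan_cage N).length = N := pvTrim_length _ _ hp
  have hG2r : ∀ r ∈ pvTrim grille N, r.length = N := pvTrim_mem_length _ _ hgr
  have hP2r : ∀ r ∈ pvTrim plan_cage N, r.length = N := pvTrim_mem_length _ _ hpr
  have hrows : (PySem.List.pyRange 0 (N : Int) 1).map (fun l =>
      (PySem.List.pyRange 0 (N : Int) 1).map (fun c =>
        PySem.List.pyGetD (PySem.List.pyGetD grille l []) c 0)) = pvTrim grille N := by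
    rw [pvRangeMapCast N]
    conv_rhs => rw [← pvMapRange (pvTrim grille N) ([] : List Int), hG2len]
    apply List.map_congr_left
    intro i hi
    have hiN : i < N := List.mem_range.mp hi
    have hfun : (fun c => PySem.List.pyGetD (PySem.List.pyGetD grille (i : Int) []) c 0) =
        (fun c => PySem.List.pyGetD (grille.getD i []) c 0) := by
      funext c; simp [PySem.List.pyGetD_natCast]
    rw [hfun, pvRangeMapGetD _ _ (pvRow_length grille N i hg hgr hiN),
        pvTrim_getD grille N i hg hiN]
  have hcage : (PySem.List.pyRange 0 (N : Int) 1).map (fun l =>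
      (PySem.List.pyRange 0 (N : Int) 1).map (fun c =>
        PySem.List.pyGetD (PySem.List.pyGetD plan_cage l []) c 0)) = pvTrim plan_cage N := by
    rw [pvRangeMapCast N]
    conv_rhs => rw [← pvMapRange (pvTrim plan_cage N) ([] : List Int), hP2len]
    apply List.map_congr_left
    intro i hi
    have hiN : i < N := List.mem_range.mp hi
    have hfun : (fun c => PySem.List.pyGetD (PySem.List.pyGetD plan_cage (i : Int) []) c 0) =
        (fun c => PySem.List.pyGetD (plan_cage.getD i []) c 0) := by
      funext c; simp [PySem.List.pyGetD_natCast]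
    rw [hfun, pvRangeMapGetD _ _ (pvRow_length plan_cage N i hp hpr hiN),
        pvTrim_getD plan_cage N i hp hiN]
  unfold initialiser_contraintes_alt pvCanon
  simp only [hrows, hcage]
  refine Prod.ext rfl (Prod.ext ?_ ?_)
  · show (pvZipStar (pvTrim grille N)).map
        (fun col => PySem.Set.ofList (col.filter (fun v => v != 0))) = _
    rw [pvZipStar_rect (pvTrim grille N) N hN hG2len hG2r,
        List.map_map]
    rfl
  · show (((List.zip (pvTrim grille N) (pvTrim plan_cage N)).foldl
        (fun d pr => (List.zip pr.1 pr.2).foldl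
          (fun d q => if q.1 ≠ 0 then d.modify q.2 [] (fun s => PySem.Set.add s q.1) else d) d)
        (((pvTrim plan_cage N).flatMap (fun crow => crow)).foldl
          (fun d num => d.insert num []) PySem.Dict.empty))).items = _
    have hc0 : ((pvTrim plan_cage N).flatMap (fun crow => crow)).foldl
        (fun d num => d.insert num ([] : List Int)) PySem.Dict.empty =
        pvP1 (pvTrim plan_cage N).flatten := by
      have hflat : (pvTrim plan_cage N).flatMap (fun crow => crow) =
          (pvTrim plan_cage N).flatten := List.flatMap_id
      rw [hflat]
      rfl
    have hinner : ∀ (d : PySem.Dict Int (List Int)) (pr : List Int × List Int),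
        (List.zip pr.1 pr.2).foldl
          (fun d q => if q.1 ≠ 0 then d.modify q.2 [] (fun s => PySem.Set.add s q.1) else d) d =
        (List.zip pr.2 pr.1).foldl pvStepM d := by
      intro d pr
      have h1 : ((List.zip pr.1 pr.2).map Prod.swap).foldl pvStepM d =
          (List.zip pr.1 pr.2).foldl
            (fun d q => if q.1 ≠ 0 then d.modify q.2 [] (fun s => PySem.Set.add s q.1) else d) d :=
        List.foldl_map
      rw [← h1, List.zip_swap]
    rw [hc0]
    rw [PySem.List.foldl_congr_mem _ _
        (fun d pr => (List.zip pr.2 pr.1).foldl pvStepM d) _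
        (fun acc x _ => hinner acc x)]
    rw [show (List.zip (pvTrim grille N) (pvTrim plan_cage N)).foldl
          (fun d pr => (List.zip pr.2 pr.1).foldl pvStepM d)
          (pvP1 (pvTrim plan_cage N).flatten) =
        (((List.zip (pvTrim grille N) (pvTrim plan_cage N)).map
            (fun pr => List.zip pr.2 pr.1)).flatten).foldl pvStepM
          (pvP1 (pvTrim plan_cage N).flatten) from by
      rw [List.foldl_flatten, List.foldl_map]]
    rw [pvZipAsRange (pvTrim grille N) (pvTrim plan_cage N)
        [] [] N hG2len hP2len, List.map_map]
    rfl

theorem initialiser_contraintes_eq (grille plan_cage : List (List Int)) (dimension : Int)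
    (hpre : Pre_initialiser_contraintes grille plan_cage dimension) :
    initialiser_contraintes grille plan_cage dimension =
      initialiser_contraintes_alt grille plan_cage dimension := by
  by_cases hd0 : dimension ≤ 0
  · have hnil : PySem.List.pyRange 0 dimension 1 = [] := PySem.List.pyRange_one_eq_nil (by omega)
    unfold initialiser_contraintes initialiser_contraintes_alt
    simp [hnil, pvZipStar, PySem.Dict.empty]
  · have h0d : 0 < dimension := by omega
    obtain ⟨hg, hp, hgr, hpr⟩ : dimension.toNat ≤ grille.length ∧
        dimension.toNat ≤ plan_cage.length ∧
        (∀ r ∈ grille.take dimension.toNat, dimension.toNat ≤ r.length) ∧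
        (∀ r ∈ plan_cage.take dimension.toNat, dimension.toNat ≤ r.length) := by
      rcases hpre with h | h
      · omega
      · exact h
    rw [pvAside grille plan_cage dimension h0d hg hp hgr hpr,
        pvBside grille plan_cage dimension h0d hg hp hgr hpr]

-- ===== VERDICT (by name: the statement is the Claim_ definition above) =====
theorem initialiser_contraintes_spec : Claim_equal_initialiser_contraintes := by
  intro grille plan_cage dimension _ hpre
  unfold Spec_initialiser_contraintes
  exact initialiser_contraintes_eq grille plan_cage dimension hpre
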